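-- pv_equiv track=rewrite | github.com/AkumaEX/beecrowd | AD-HOC/3024/main.py | maximum_viewpoints
-- ===== SOURCE A (Python) =====
-- def maximum_viewpoints(n, x, a):
--     max = 1
--     viewpoints = 1
--     for i in range(n-1):
--         if a[i+1] - a[i] > x:
--             viewpoints = 1
--         elif (viewpoints := viewpoints+1) > max:
--             max = viewpoints
--     return max
-- ===== SOURCE B (Python) =====
-- def maximum_viewpoints(n, x, a):
--     # Break-index decomposition: find the gaps larger than x, then the answer
--     # is the longest stretch between consecutive breaks.
--     breaks = [i for i in range(n - 1) if a[i + 1] - a[i] > x]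
--     best = 0
--     prev = -1
--     for b in breaks:
--         best = max(best, b - prev)
--         prev = b
--     best = max(best, n - 1 - prev)
--     return max(1, best)
-- ===== Notes on version B (the rewrite author's own statement) =====
-- stated objective: alternative
-- what changed: Replaced A's single fused loop carrying (current run, best run) state by a break-index decomposition: collect the indices where the gap exceeds x, then take the maximal distance between consecutive breaks.
import Mathlib
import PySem

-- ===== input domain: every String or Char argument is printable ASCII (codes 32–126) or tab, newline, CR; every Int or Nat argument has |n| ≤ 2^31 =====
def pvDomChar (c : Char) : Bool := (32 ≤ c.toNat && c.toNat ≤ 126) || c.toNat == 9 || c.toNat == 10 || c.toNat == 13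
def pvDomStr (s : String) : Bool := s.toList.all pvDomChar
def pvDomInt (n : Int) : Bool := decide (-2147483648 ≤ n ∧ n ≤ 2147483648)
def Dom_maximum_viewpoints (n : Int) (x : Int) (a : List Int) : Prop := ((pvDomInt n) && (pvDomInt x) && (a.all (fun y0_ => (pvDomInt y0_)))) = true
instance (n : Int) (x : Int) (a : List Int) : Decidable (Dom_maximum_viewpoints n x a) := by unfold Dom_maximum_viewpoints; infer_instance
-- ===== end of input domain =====

-- B replaces A's fused run-tracking loop by a break-index decomposition (same asymptotic cost).
-- Equivalence of RETURN values is proved on Pre_ (inputs where Python raises no IndexError).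

-- ===== PORT A =====
-- literal port of A's loop: state (max, viewpoints), branches in source order
def maximum_viewpoints (n : Int) (x : Int) (a : List Int) : Int :=
  let st := (PySem.List.pyRange 0 (n - 1) 1).foldl
    (fun (s : Int × Int) i =>
      if (PySem.List.pyGetD a (i + 1) 0) - (PySem.List.pyGetD a i 0) > x then (s.1, 1)
      else if s.2 + 1 > s.1 then (s.2 + 1, s.2 + 1) else (s.1, s.2 + 1))
    (1, 1)
  st.1

-- ===== PORT B =====
-- literal port of Source B: break indices, then fold computing the maximal gap
def maximum_viewpoints_alt (n : Int) (x : Int) (a : List Int) : Int :=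
  let breaks := (PySem.List.pyRange 0 (n - 1) 1).filter
    (fun i => decide ((PySem.List.pyGetD a (i + 1) 0) - (PySem.List.pyGetD a i 0) > x))
  let st := breaks.foldl (fun (bp : Int × Int) b => (max bp.1 (b - bp.2), b)) (0, -1)
  let best := max st.1 (n - 1 - st.2)
  max 1 best

-- ===== PRECONDITION & SPEC =====
-- Pre_ excludes exactly the inputs where the Python A (and B alike) raises IndexError: n ≥ 2 with n > len(a).
def Pre_maximum_viewpoints (n : Int) (x : Int) (a : List Int) : Prop := n ≤ 1 ∨ n ≤ (a.length : Int)
instance (n : Int) (x : Int) (a : List Int) : Decidable (Pre_maximum_viewpoints n x a) := by unfold Pre_maximum_viewpoints; infer_instance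
def pvWitness_maximum_viewpoints : Int × Int × List Int := (4, 2, [1, 2, 7, 8])

def Spec_maximum_viewpoints (n : Int) (x : Int) (a : List Int) (out : Int) : Prop := out = maximum_viewpoints_alt n x a
instance (n : Int) (x : Int) (a : List Int) (out : Int) : Decidable (Spec_maximum_viewpoints n x a out) := by unfold Spec_maximum_viewpoints; infer_instance

-- ===== CLAIM (what is proved, stated in full; the proofs are below) =====
def Claim_equal_maximum_viewpoints : Prop := ∀ (n : Int) (x : Int) (a : List Int), Dom_maximum_viewpoints n x a → Pre_maximum_viewpoints n x a → Spec_maximum_viewpoints n x a (maximum_viewpoints n x a)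

-- ===== LEMMAS AND PROOFS =====

-- reference "best run ending at/after" function over the integer interval [i, m) with predicate p (the break test)
def pvBF (p : Int → Bool) (vp i m : Int) : Int :=
  if _h : i < m then
    if p i then max vp (pvBF p 1 (i + 1) m) else max (vp + 1) (pvBF p (vp + 1) (i + 1) m)
  else vp
termination_by (m - i).toNat
decreasing_by all_goals omega

theorem pvBF_ge (p : Int → Bool) (vp i m : Int) : vp ≤ pvBF p vp i m := by
  unfold pvBF
  split
  · split
    · exact le_max_left _ _
    · exact le_trans (by omega) (le_max_left _ _)
  · exact le_refl _

-- A's loop computes max mx (pvBF p vp i m)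
theorem pvA_char (p : Int → Bool) (m : Int) :
    ∀ i mx vp : Int, 1 ≤ vp → vp ≤ mx →
    ((PySem.List.pyRange i m 1).foldl
      (fun (s : Int × Int) j =>
        if p j then (s.1, 1)
        else if s.2 + 1 > s.1 then (s.2 + 1, s.2 + 1) else (s.1, s.2 + 1))
      (mx, vp)).1 = max mx (pvBF p vp i m) := by
  intro i
  induction hk : (m - i).toNat generalizing i with
  | zero =>
    intro mx vp h1 h2
    rw [PySem.List.pyRange_one_eq_nil (by omega)]
    unfold pvBF
    rw [dif_neg (by omega)]
    simp; omega
  | succ k ih =>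
    intro mx vp h1 h2
    rw [PySem.List.pyRange_one_cons (by omega)]
    unfold pvBF
    rw [dif_pos (by omega)]
    simp only [List.foldl_cons]
    by_cases hp : p i
    · rw [if_pos hp, if_pos hp, ih (i + 1) (by omega) mx 1 le_rfl (by omega)]
      have := pvBF_ge p 1 (i + 1) m
      omega
    · rw [if_neg hp, if_neg hp]
      have := pvBF_ge p (vp + 1) (i + 1) m
      split_ifs with hgt
      · rw [ih (i + 1) (by omega) (vp + 1) (vp + 1) (by omega) le_rfl]
        omega
      · rw [ih (i + 1) (by omega) mx (vp + 1) (by omega) (by omega)]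
        omega

-- B's fold over the break indices of [i, m) computes max best (pvBF p (i - prev) i m)
theorem pvB_char (p : Int → Bool) (m : Int) :
    ∀ i best prev : Int, i ≤ m →
    (let st := ((PySem.List.pyRange i m 1).filter p).foldl
        (fun (bp : Int × Int) b => (max bp.1 (b - bp.2), b)) (best, prev)
     max st.1 (m - st.2)) = max best (pvBF p (i - prev) i m) := by
  intro i
  induction hk : (m - i).toNat generalizing i with
  | zero =>
    intro best prev him
    rw [PySem.List.pyRange_one_eq_nil (by omega)]
    unfold pvBF
    rw [dif_neg (by omega)]
    simp
    omega
  | succ k ih =>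
    intro best prev him
    rw [PySem.List.pyRange_one_cons (by omega)]
    unfold pvBF
    rw [dif_pos (by omega)]
    simp only [List.filter_cons]
    by_cases hp : p i
    · rw [if_pos (by simpa using hp), if_pos hp]
      simp only [List.foldl_cons]
      rw [ih (i + 1) (by omega) (max best (i - prev)) i (by omega)]
      have : i + 1 - i = 1 := by omega
      rw [this]
      omega
    · rw [if_neg (by simpa using hp), if_neg hp]
      rw [ih (i + 1) (by omega) best prev (by omega)]
      have h2 : i + 1 - prev = i - prev + 1 := by omega
      rw [h2]
      have := pvBF_ge p (i - prev + 1) (i + 1) m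
      omega

-- ===== VERDICT (by name: the statement is the Claim_ definition above) =====
theorem maximum_viewpoints_spec : Claim_equal_maximum_viewpoints := by
  intro n x a _hdom _hpre
  unfold Spec_maximum_viewpoints maximum_viewpoints maximum_viewpoints_alt
  by_cases hn : n ≤ 1
  · -- loop is empty on both sides
    rw [PySem.List.pyRange_one_eq_nil (by omega)]
    simp
    omega
  · -- n ≥ 2
    have hA := pvA_char (fun i => decide ((PySem.List.pyGetD a (i + 1) 0) - (PySem.List.pyGetD a i 0) > x)) (n - 1) 0 1 1 le_rfl le_rfl
    have hB := pvB_char (fun i => decide ((PySem.List.pyGetD a (i + 1) 0) - (PySem.List.pyGetD a i 0) > x)) (n - 1) 0 0 (-1) (by omega)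
    have hge := pvBF_ge (fun i => decide ((PySem.List.pyGetD a (i + 1) 0) - (PySem.List.pyGetD a i 0) > x)) 1 0 (n - 1)
    simp only [decide_eq_true_eq, show (0 : Int) - (-1) = 1 by omega] at hA hB
    simp only []
    rw [hA]
    rw [hB]
    omega
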